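-- pv_equiv track=rewrite | github.com/DanyAraujo0/AprendendoPython | desafios_projetos/desafio_atendimento.py | ordem_pacientes
-- ===== SOURCE A (Python) =====
-- def ordem_pacientes(pacientes):
--     ordenada = []
--
--     for i, (nome, idade, status) in enumerate(pacientes):
--         if status.strip().lower() == "urgente":
--             prioridade = 0
--         elif idade > 60:
--             prioridade = 1
--         else:
--             prioridade = 2
--
--         ordenada.append((prioridade, -idade, i, nome))
--
--     ordenada.sort()
--     return [item[3] for item in ordenada]
-- ===== SOURCE B (Python) =====
-- def ordem_pacientes(pacientes):
--     urgentes, idosos, outros = [], [], []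
--     for nome, idade, status in pacientes:
--         if status.strip().lower() == "urgente":
--             urgentes.append((nome, idade))
--         elif idade > 60:
--             idosos.append((nome, idade))
--         else:
--             outros.append((nome, idade))
--     resultado = []
--     for grupo in (urgentes, idosos, outros):
--         grupo.sort(key=lambda p: -p[1])
--         resultado.extend(nome for nome, _ in grupo)
--     return resultado
-- ===== Notes on version B (the rewrite author's own statement) =====
-- stated objective: alternative
-- what changed: Instead of annotating every patient with a composite tuple (priority, -age, index, name) and doing one global sort, B buckets patients into urgent/elderly/other in one pass, stably sorts each bucket by age descending (key=-age preserves arrival order on ties), and concatenates the three name lists.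
import Mathlib
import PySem

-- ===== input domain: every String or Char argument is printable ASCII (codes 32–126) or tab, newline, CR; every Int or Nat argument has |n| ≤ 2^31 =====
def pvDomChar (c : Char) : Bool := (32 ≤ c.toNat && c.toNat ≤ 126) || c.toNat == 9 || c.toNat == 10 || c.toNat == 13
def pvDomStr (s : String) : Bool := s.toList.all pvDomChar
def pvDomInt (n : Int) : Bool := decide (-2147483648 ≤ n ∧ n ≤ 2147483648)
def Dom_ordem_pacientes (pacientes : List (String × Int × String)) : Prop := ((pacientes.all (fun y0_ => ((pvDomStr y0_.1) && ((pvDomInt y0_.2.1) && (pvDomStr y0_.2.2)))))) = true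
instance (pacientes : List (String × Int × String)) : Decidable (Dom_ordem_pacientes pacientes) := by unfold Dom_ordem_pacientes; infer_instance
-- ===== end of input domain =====

-- B replaces A's single global sort on composite tuples (priority, -age, index, name) by a bucketing
-- pass into three lists followed by three local stable sorts on age only (objective: alternative).

-- ===== PORT A =====
-- Python's list.sort() on 4-tuples compares lexicographically; ported as a sort keyed by the
-- lexicographic product order (exact: String's order is code-point order, matching Python on ASCII).
def pvKeyA (t : Int × Int × Int × String) : Int ×ₗ (Int ×ₗ (Int ×ₗ String)) :=
  toLex (t.1, toLex (t.2.1, toLex (t.2.2.1, t.2.2.2)))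

def ordem_pacientes (pacientes : List (String × Int × String)) : List String :=
  let ordenada : List (Int × Int × Int × String) :=
    (PySem.List.enumerate pacientes).foldl
      (fun acc p =>
        acc ++ [(if PySem.Str.lower (PySem.Str.strip p.2.2.2) = "urgente" then (0 : Int)
                 else if p.2.2.1 > 60 then 1 else 2, -p.2.2.1, p.1, p.2.1)]) []
  (PySem.List.sorted ordenada pvKeyA false).map (fun t => t.2.2.2)

-- ===== PORT B =====
def ordem_pacientes_alt (pacientes : List (String × Int × String)) : List String :=
  let buckets :=
    pacientes.foldl
      (fun (acc : List (String × Int) × List (String × Int) × List (String × Int)) p =>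
        if PySem.Str.lower (PySem.Str.strip p.2.2) = "urgente" then
          (acc.1 ++ [(p.1, p.2.1)], acc.2.1, acc.2.2)
        else if p.2.1 > 60 then
          (acc.1, acc.2.1 ++ [(p.1, p.2.1)], acc.2.2)
        else
          (acc.1, acc.2.1, acc.2.2 ++ [(p.1, p.2.1)]))
      ([], [], [])
  (PySem.List.sorted buckets.1 (fun p => -p.2) false).map (fun p => p.1)
    ++ (PySem.List.sorted buckets.2.1 (fun p => -p.2) false).map (fun p => p.1)
    ++ (PySem.List.sorted buckets.2.2 (fun p => -p.2) false).map (fun p => p.1)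

-- ===== PRECONDITION & SPEC =====
def Spec_ordem_pacientes (pacientes : List (String × Int × String)) (out : List String) : Prop := out = ordem_pacientes_alt pacientes
instance (pacientes : List (String × Int × String)) (out : List String) : Decidable (Spec_ordem_pacientes pacientes out) := by unfold Spec_ordem_pacientes; infer_instance

-- ===== CLAIM (what is proved, stated in full; the proofs are below) =====
def Claim_equal_ordem_pacientes : Prop := ∀ (pacientes : List (String × Int × String)), Dom_ordem_pacientes pacientes → Spec_ordem_pacientes pacientes (ordem_pacientes pacientes)

-- ===== LEMMAS AND PROOFS =====

-- the annotation A attaches to each patient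
def pvG (p : Int × (String × Int × String)) : Int × Int × Int × String :=
  (if PySem.Str.lower (PySem.Str.strip p.2.2.2) = "urgente" then (0 : Int)
   else if p.2.2.1 > 60 then 1 else 2, -p.2.2.1, p.1, p.2.1)

def pvAnn (pacientes : List (String × Int × String)) : List (Int × Int × Int × String) :=
  (PySem.List.enumerate pacientes).map pvG

def pvProj (t : Int × Int × Int × String) : String × Int := (t.2.2.2, -t.2.1)

def pvFil (k : Int) (xs : List (Int × Int × Int × String)) : List (Int × Int × Int × String) :=
  xs.filter (fun t => t.1 == k)

lemma pvA_char (pacientes : List (String × Int × String)) :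
    ordem_pacientes pacientes = (PySem.List.sorted (pvAnn pacientes) pvKeyA false).map (fun t => t.2.2.2) := by
  show (PySem.List.sorted ((PySem.List.enumerate pacientes).foldl
      (fun acc x => acc ++ [pvG x]) []) pvKeyA false).map (fun t => t.2.2.2) = _
  rw [PySem.List.foldl_append_singleton_eq_map]
  simp [pvAnn]

lemma pvB_buckets (pacientes : List (String × Int × String)) :
    ∀ (s : Int) (a0 a1 a2 : List (String × Int)),
      pacientes.foldl
        (fun (acc : List (String × Int) × List (String × Int) × List (String × Int)) p =>
          if PySem.Str.lower (PySem.Str.strip p.2.2) = "urgente" then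
            (acc.1 ++ [(p.1, p.2.1)], acc.2.1, acc.2.2)
          else if p.2.1 > 60 then
            (acc.1, acc.2.1 ++ [(p.1, p.2.1)], acc.2.2)
          else
            (acc.1, acc.2.1, acc.2.2 ++ [(p.1, p.2.1)]))
        (a0, a1, a2)
      = (a0 ++ (pvFil 0 ((PySem.List.enumerate pacientes s).map pvG)).map pvProj,
         a1 ++ (pvFil 1 ((PySem.List.enumerate pacientes s).map pvG)).map pvProj,
         a2 ++ (pvFil 2 ((PySem.List.enumerate pacientes s).map pvG)).map pvProj) := by
  induction pacientes with
  | nil => intro s a0 a1 a2; simp [PySem.List.enumerate_nil, pvFil]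
  | cons p ps ih =>
    intro s a0 a1 a2
    rw [PySem.List.enumerate_cons, List.map_cons, List.foldl_cons]
    by_cases hc : PySem.Str.lower (PySem.Str.strip p.2.2) = "urgente"
    · rw [if_pos hc, ih (s+1)]
      simp [pvFil, pvG, pvProj, hc]
    · rw [if_neg hc]
      by_cases h60 : p.2.1 > 60
      · rw [if_pos h60, ih (s+1)]
        simp [pvFil, pvG, pvProj, hc, h60]
      · rw [if_neg h60, ih (s+1)]
        simp [pvFil, pvG, pvProj, hc, h60]

lemma pvEnum_fst_le (xs : List (String × Int × String)) :
    ∀ (s : Int) (y : Int × (String × Int × String)), y ∈ PySem.List.enumerate xs s → s ≤ y.1 := by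
  induction xs with
  | nil => simp [PySem.List.enumerate_nil]
  | cons x xs ih =>
    intro s y hy
    rw [PySem.List.enumerate_cons] at hy
    rcases List.mem_cons.mp hy with hy | hy
    · simp [hy]
    · have := ih (s + 1) y hy; omega

lemma pvEnum_fst_lt (xs : List (String × Int × String)) :
    ∀ s : Int, (PySem.List.enumerate xs s).Pairwise (fun a b => a.1 < b.1) := by
  induction xs with
  | nil => simp [PySem.List.enumerate_nil]
  | cons x xs ih =>
    intro s
    rw [PySem.List.enumerate_cons]
    refine List.Pairwise.cons ?_ (ih (s + 1))
    intro y hy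
    have := pvEnum_fst_le xs (s + 1) y hy
    simpa using by omega

lemma pvAnn_idx_lt (pacientes : List (String × Int × String)) :
    (pvAnn pacientes).Pairwise (fun a b => a.2.2.1 < b.2.2.1) := by
  unfold pvAnn
  rw [List.pairwise_map]
  exact (pvEnum_fst_lt pacientes 0).imp (fun h => by simpa [pvG] using h)

lemma pvAnn_prio (pacientes : List (String × Int × String)) :
    ∀ t ∈ pvAnn pacientes, t.1 = 0 ∨ t.1 = 1 ∨ t.1 = 2 := by
  intro t ht
  simp only [pvAnn, List.mem_map] at ht
  obtain ⟨x, -, rfl⟩ := ht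
  simp only [pvG]
  split_ifs <;> simp

lemma pvPartition (xs : List (Int × Int × Int × String))
    (h : ∀ t ∈ xs, t.1 = 0 ∨ t.1 = 1 ∨ t.1 = 2) :
    xs.Perm (pvFil 0 xs ++ pvFil 1 xs ++ pvFil 2 xs) := by
  induction xs with
  | nil => simp [pvFil]
  | cons a xs ih =>
    have ih' : xs.Perm (List.filter (fun t => t.1 == 0) xs ++
        (List.filter (fun t => t.1 == 1) xs ++ List.filter (fun t => t.1 == 2) xs)) := by
      simpa [pvFil, List.append_assoc] using ih (fun t ht => h t (List.mem_cons_of_mem a ht))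
    rcases h a (List.mem_cons_self) with ha | ha | ha
    · simp only [pvFil, List.filter_cons, ha]
      simp only [List.append_assoc]
      norm_num
      exact ih'
    · simp only [pvFil, List.filter_cons, ha]
      simp only [List.append_assoc]
      norm_num
      exact (ih'.cons a).trans List.perm_middle.symm
    · simp only [pvFil, List.filter_cons, ha]
      simp only [List.append_assoc]
      norm_num
      refine (ih'.cons a).trans ?_
      have := (List.perm_middle (a := a)
        (l₁ := List.filter (fun t => t.1 == 0) xs ++ List.filter (fun t => t.1 == 1) xs)
        (l₂ := List.filter (fun t => t.1 == 2) xs)).symm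
      simpa [List.append_assoc] using this

lemma pvKeyA_lt_iff (a b : Int × Int × Int × String) :
    pvKeyA a < pvKeyA b ↔
      a.1 < b.1 ∨ (a.1 = b.1 ∧ (a.2.1 < b.2.1 ∨ (a.2.1 = b.2.1 ∧
        (a.2.2.1 < b.2.2.1 ∨ (a.2.2.1 = b.2.2.1 ∧ a.2.2.2 < b.2.2.2))))) := by
  simp [pvKeyA, Prod.Lex.lt_iff]

lemma pvSplit (xs : List (Int × Int × Int × String))
    (hp : ∀ t ∈ xs, t.1 = 0 ∨ t.1 = 1 ∨ t.1 = 2)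
    (hi : xs.Pairwise (fun a b => a.2.2.1 < b.2.2.1)) :
    PySem.List.sorted xs pvKeyA false =
      PySem.List.sorted (pvFil 0 xs) pvKeyA false
        ++ PySem.List.sorted (pvFil 1 xs) pvKeyA false
        ++ PySem.List.sorted (pvFil 2 xs) pvKeyA false := by
  have hw : ∀ k : Int, (PySem.List.sorted (pvFil k xs) pvKeyA false).Pairwise
      (fun a b => pvKeyA a < pvKeyA b) := by
    intro k
    have hle := PySem.List.sorted_pairwise (pvFil k xs) pvKeyA
    have hne : (PySem.List.sorted (pvFil k xs) pvKeyA false).Pairwise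
        (fun a b => a.2.2.1 ≠ b.2.2.1) :=
      (List.Perm.pairwise_iff (fun h => Ne.symm h)
        (PySem.List.sorted_perm (pvFil k xs) pvKeyA false)).mpr
        ((hi.filter _).imp (fun h => by omega))
    refine (hle.and hne).imp ?_
    rintro a b ⟨h1, h2⟩
    refine lt_of_le_of_ne h1 (fun he => h2 ?_)
    have hcomp : a.1 = b.1 ∧ a.2.1 = b.2.1 ∧ a.2.2.1 = b.2.2.1 ∧ a.2.2.2 = b.2.2.2 := by
      simpa [pvKeyA, Prod.ext_iff] using he
    exact hcomp.2.2.1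
  have hmemk : ∀ (k : Int) (a : Int × Int × Int × String),
      a ∈ PySem.List.sorted (pvFil k xs) pvKeyA false → a.1 = k := by
    intro k a ha
    have h0 : a ∈ xs ∧ a.1 = k := by
      simpa [pvFil, List.mem_filter] using (PySem.List.mem_sorted (pvFil k xs) pvKeyA false a).mp ha
    exact h0.2
  have hcross : ∀ (j k : Int), j < k →
      ∀ a ∈ PySem.List.sorted (pvFil j xs) pvKeyA false,
      ∀ b ∈ PySem.List.sorted (pvFil k xs) pvKeyA false, pvKeyA a < pvKeyA b := by
    intro j k hjk a ha b hb
    have h1 := hmemk j a ha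
    have h2 := hmemk k b hb
    rw [pvKeyA_lt_iff]
    left; omega
  refine PySem.List.sorted_eq_of_perm_of_pairwise_lt _ _ _ ?_ ?_
  · exact ((((PySem.List.sorted_perm _ _ _).append
      (PySem.List.sorted_perm _ _ _)).append
      (PySem.List.sorted_perm _ _ _))).trans (pvPartition xs hp).symm
  · rw [List.pairwise_append, List.pairwise_append]
    exact ⟨⟨hw 0, hw 1, fun a ha b hb => hcross 0 1 (by norm_num) a ha b hb⟩, hw 2,
      fun a ha b hb => by
        rcases List.mem_append.mp ha with h | h
        · exact hcross 0 2 (by norm_num) a h b hb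
        · exact hcross 1 2 (by norm_num) a h b hb⟩

lemma pvMap_insertBy {α β : Type} (f : α → β) (pA : α → α → Bool) (pB : β → β → Bool)
    (x : α) (ys : List α) (h : ∀ y ∈ ys, pA x y = pB (f x) (f y)) :
    (PySem.List.insertBy pA x ys).map f = PySem.List.insertBy pB (f x) (ys.map f) := by
  induction ys with
  | nil => simp [PySem.List.insertBy]
  | cons y ys ih =>
    have hxy := h y (List.mem_cons_self)
    by_cases hb : pA x y = true
    · simp [PySem.List.insertBy, hb, ← hxy]
    · have hb' : pB (f x) (f y) = false := by rw [← hxy]; simpa using hb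
      simp [PySem.List.insertBy, hb, hb', ih (fun z hz => h z (List.mem_cons_of_mem y hz))]

lemma pvFoldl_insert_comm {α β κ₁ κ₂ : Type} [LinearOrder κ₁] [LinearOrder κ₂]
    (f : α → β) (kA : α → κ₁) (kB : β → κ₂) :
    ∀ (xs : List α) (acc : List α),
      (∀ x ∈ xs, ∀ y ∈ acc, decide (kA x < kA y) = decide (kB (f x) < kB (f y))) →
      xs.Pairwise (fun a b => decide (kA b < kA a) = decide (kB (f b) < kB (f a))) →
      (xs.foldl (fun acc x => PySem.List.insertBy (fun a b => decide (kA a < kA b)) x acc) acc).map f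
        = (xs.map f).foldl (fun acc x => PySem.List.insertBy (fun a b => decide (kB a < kB b)) x acc) (acc.map f) := by
  intro xs
  induction xs with
  | nil => intro acc _ _; simp
  | cons x xs ih =>
    intro acc hacc hpw
    have h1 : ∀ y ∈ acc, (decide (kA x < kA y)) = decide (kB (f x) < kB (f y)) :=
      fun y hy => hacc x List.mem_cons_self y hy
    have hrec := ih (PySem.List.insertBy (fun a b => decide (kA a < kA b)) x acc)
      (fun x' hx' y hy => by
        rcases (PySem.List.mem_insertBy _ x y acc).mp hy with rfl | hy
        · exact List.rel_of_pairwise_cons hpw hx'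
        · exact hacc x' (List.mem_cons_of_mem x hx') y hy)
      hpw.of_cons
    simp only [List.foldl_cons, List.map_cons]
    rw [hrec, pvMap_insertBy f (fun a b => decide (kA a < kA b)) (fun a b => decide (kB a < kB b)) x acc h1]

lemma pvSorted_map_comm {α β κ₁ κ₂ : Type} [LinearOrder κ₁] [LinearOrder κ₂]
    (f : α → β) (kA : α → κ₁) (kB : β → κ₂) (xs : List α)
    (h : xs.Pairwise (fun a b => decide (kA b < kA a) = decide (kB (f b) < kB (f a)))) :
    (PySem.List.sorted xs kA false).map f = PySem.List.sorted (xs.map f) kB false := by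
  rw [PySem.List.sorted_eq_foldl_insertBy, PySem.List.sorted_eq_foldl_insertBy]
  exact pvFoldl_insert_comm f kA kB xs [] (by simp) h

lemma pvChunk (k : Int) (xs : List (Int × Int × Int × String))
    (hi : xs.Pairwise (fun a b => a.2.2.1 < b.2.2.1)) :
    (PySem.List.sorted (pvFil k xs) pvKeyA false).map (fun t => t.2.2.2)
      = (PySem.List.sorted ((pvFil k xs).map pvProj) (fun p => -p.2) false).map (fun p => p.1) := by
  have hmem : ∀ t ∈ pvFil k xs, t.1 = k := by
    intro t ht
    have h0 : t ∈ xs ∧ t.1 = k := by simpa [pvFil, List.mem_filter] using ht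
    exact h0.2
  have hp : (pvFil k xs).Pairwise (fun a b => a.2.2.1 < b.2.2.1) := hi.filter _
  have hpair : (pvFil k xs).Pairwise (fun a b =>
      decide (pvKeyA b < pvKeyA a)
        = decide ((fun p : String × Int => -p.2) (pvProj b) < (fun p : String × Int => -p.2) (pvProj a))) := by
    refine hp.imp_of_mem ?_
    intro a b ha hb hlt
    have ha1 := hmem a ha
    have hb1 := hmem b hb
    have hiff : (pvKeyA b < pvKeyA a) ↔ (b.2.1 < a.2.1) := by
      rw [pvKeyA_lt_iff]
      constructor
      · rintro (h | ⟨-, h | ⟨-, h | ⟨h, -⟩⟩⟩) <;> omega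
      · intro h; exact Or.inr ⟨by omega, Or.inl h⟩
    simp [pvProj, hiff]
  have hcomm := pvSorted_map_comm pvProj pvKeyA (fun p : String × Int => -p.2) (pvFil k xs) hpair
  rw [← hcomm, List.map_map]
  rfl

-- ===== VERDICT (by name: the statement is the Claim_ definition above) =====
theorem ordem_pacientes_spec : Claim_equal_ordem_pacientes := by
  intro pacientes _
  unfold Spec_ordem_pacientes
  rw [pvA_char]
  show _ = ordem_pacientes_alt pacientes
  unfold ordem_pacientes_alt
  rw [pvB_buckets pacientes 0 [] [] []]
  simp only [List.nil_append]
  rw [pvSplit (pvAnn pacientes) (pvAnn_prio pacientes) (pvAnn_idx_lt pacientes)]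
  rw [List.map_append, List.map_append]
  rw [pvChunk 0 _ (pvAnn_idx_lt pacientes), pvChunk 1 _ (pvAnn_idx_lt pacientes),
      pvChunk 2 _ (pvAnn_idx_lt pacientes)]
  rfl
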